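-- pv_equiv track=rewrite | github.com/LoicH/coding_challenges | advent_of_code_2021/22.py | diff
-- ===== SOURCE A (Python) =====
-- def intersect_range(a0, a1, b0, b1):
--     """Return the range that is the intersection of [a0, a1] and [b0, b1]"""
--     return (max(a0, b0), min(a1, b1))
--
-- def diff(a, b):
--     """return the cuboids that make the difference of cuboid A minus cuboid B.
--     i.e. diff(a, b) will return the cuboids that we can find in A but not in B"""
--     # split on the X axis to create left and right cuboids
--     # left is where X decrease and right is where X increase
--     common_x = intersect_range(a[0], a[1], b[0], b[1])
--     left = (a[0], common_x[0] - 1) + a[2:] if a[0] != common_x[0] else None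
--     right = (common_x[1] + 1, a[1]) + a[2:] if a[1] != common_x[1] else None
--
--     # Now split the middle along the Y axis to create upper and lower cuboids
--     # Bottom is or negative Y and Up is for positive Y
--     common_y = intersect_range(a[2], a[3], b[2], b[3])
--     lower = common_x + (a[2], common_y[0] - 1) + a[4:] if a[2] != common_y[0] else None
--     upper = common_x + (common_y[1] + 1, a[3]) + a[4:] if a[3] != common_y[1] else None
--
--     # And finish with splitting along the Z axis to have a front and back cuboids
--     # Front is negative Z and Back is positive Z
--     common_z = intersect_range(a[4], a[5], b[4], b[5])
--     common = common_x + common_y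
--     front = common + (a[4], common_z[0] - 1) if a[4] != common_z[0] else None
--     back = common + (common_z[1] + 1, a[5]) if a[5] != common_z[1] else None
--
--     # Now return the real cuboids
--     return [c for c in (left, right, lower, upper, front, back) if c]
-- ===== SOURCE B (Python) =====
-- def diff(a, b):
--     """return the cuboids that make the difference of cuboid A minus cuboid B."""
--     def rec(a, b, axes):
--         # recursively split along the first axis pair, then prepend the
--         # intersected range of this axis to every piece coming from the rest
--         if axes == 0:
--             return []
--         lo, hi = max(a[0], b[0]), min(a[1], b[1])
--         # coordinates trailing the axis being split ride along unchanged;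
--         # the final split carries none
--         tail = tuple(a[2:]) if axes > 1 else ()
--         pieces = []
--         if a[0] != lo:
--             pieces.append((a[0], lo - 1) + tail)
--         if a[1] != hi:
--             pieces.append((hi + 1, a[1]) + tail)
--         pieces.extend((lo, hi) + p for p in rec(a[2:], b[2:], axes - 1))
--         return pieces
--     return rec(tuple(a), tuple(b), 3)
-- ===== Notes on version B (the rewrite author's own statement) =====
-- stated objective: alternative
-- what changed: Replaces A's six named optional cuboids (three unrolled per-axis blocks filtered at the end) by a recursive subtraction on the list of axis ranges: each call emits the two off-cuts of the first axis and prepends that axis's intersected range to every piece returned by the recursive call on the remaining axes, so later pieces get their common prefix attached on the way back up instead of being assembled from named intermediates.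
import Mathlib
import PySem

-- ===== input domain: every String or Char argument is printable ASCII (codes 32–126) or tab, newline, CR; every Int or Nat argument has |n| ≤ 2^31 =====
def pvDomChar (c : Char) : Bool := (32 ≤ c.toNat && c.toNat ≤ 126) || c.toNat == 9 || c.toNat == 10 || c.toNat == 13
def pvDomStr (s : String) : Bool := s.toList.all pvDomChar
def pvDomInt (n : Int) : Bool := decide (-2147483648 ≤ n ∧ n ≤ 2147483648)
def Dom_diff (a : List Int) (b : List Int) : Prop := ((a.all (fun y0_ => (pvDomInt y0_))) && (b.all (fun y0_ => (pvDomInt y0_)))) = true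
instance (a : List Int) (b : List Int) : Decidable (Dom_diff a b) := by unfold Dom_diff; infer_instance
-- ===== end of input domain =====

-- B rewrites A's six named optional cuboids as a recursion over the axis-range list: each level
-- emits the first axis's two off-cuts and prepends that axis's intersected range to the pieces of
-- the recursive call (objective: alternative decomposition; same cost).

-- ===== PORT A =====
def intersectRange (a0 a1 b0 b1 : Int) : Int × Int := (max a0 b0, min a1 b1)

def diff (a : List Int) (b : List Int) : List (List Int) :=
  let ga := fun (i : Int) => PySem.List.pyGetD a i 0
  let gb := fun (i : Int) => PySem.List.pyGetD b i 0
  let cx := intersectRange (ga 0) (ga 1) (gb 0) (gb 1)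
  let left : Option (List Int) :=
    if ga 0 ≠ cx.1 then some ([ga 0, cx.1 - 1] ++ PySem.List.slice a (some 2) none) else none
  let right : Option (List Int) :=
    if ga 1 ≠ cx.2 then some ([cx.2 + 1, ga 1] ++ PySem.List.slice a (some 2) none) else none
  let cy := intersectRange (ga 2) (ga 3) (gb 2) (gb 3)
  let lower : Option (List Int) :=
    if ga 2 ≠ cy.1 then some ([cx.1, cx.2] ++ [ga 2, cy.1 - 1] ++ PySem.List.slice a (some 4) none) else none
  let upper : Option (List Int) :=
    if ga 3 ≠ cy.2 then some ([cx.1, cx.2] ++ [cy.2 + 1, ga 3] ++ PySem.List.slice a (some 4) none) else none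
  let cz := intersectRange (ga 4) (ga 5) (gb 4) (gb 5)
  let common : List Int := [cx.1, cx.2] ++ [cy.1, cy.2]
  let front : Option (List Int) :=
    if ga 4 ≠ cz.1 then some (common ++ [ga 4, cz.1 - 1]) else none
  let back : Option (List Int) :=
    if ga 5 ≠ cz.2 then some (common ++ [cz.2 + 1, ga 5]) else none
  [left, right, lower, upper, front, back].filterMap id

-- ===== PORT B =====
def diffRec (a b : List Int) : Nat → List (List Int)
  | 0 => []
  | k+1 =>
    let lo := max (PySem.List.pyGetD a 0 0) (PySem.List.pyGetD b 0 0)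
    let hi := min (PySem.List.pyGetD a 1 0) (PySem.List.pyGetD b 1 0)
    let tail := if k > 0 then PySem.List.slice a (some 2) none else []
    let p0 : List (List Int) :=
      if PySem.List.pyGetD a 0 0 ≠ lo then [[PySem.List.pyGetD a 0 0, lo - 1] ++ tail] else []
    let p1 : List (List Int) :=
      if PySem.List.pyGetD a 1 0 ≠ hi then [[hi + 1, PySem.List.pyGetD a 1 0] ++ tail] else []
    p0 ++ p1 ++
      (diffRec (PySem.List.slice a (some 2) none) (PySem.List.slice b (some 2) none) k).map
        (fun p => [lo, hi] ++ p)

def diff_alt (a : List Int) (b : List Int) : List (List Int) := diffRec a b 3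

-- ===== PRECONDITION & SPEC =====
-- Exactly the inputs on which A returns: both cuboids need indices 0..5 (else IndexError).
def Pre_diff (a : List Int) (b : List Int) : Prop := 6 ≤ a.length ∧ 6 ≤ b.length
instance (a : List Int) (b : List Int) : Decidable (Pre_diff a b) := by unfold Pre_diff; infer_instance

def pvWitness_diff : List Int × List Int := ([0, 9, 0, 9, 0, 9], [2, 4, 2, 4, 2, 4])

def Spec_diff (a : List Int) (b : List Int) (out : List (List Int)) : Prop := out = diff_alt a b
instance (a : List Int) (b : List Int) (out : List (List Int)) : Decidable (Spec_diff a b out) := by unfold Spec_diff; infer_instance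

-- ===== CLAIM (what is proved, stated in full; the proofs are below) =====
def Claim_equal_diff : Prop := ∀ (a : List Int) (b : List Int), Dom_diff a b → Pre_diff a b → Spec_diff a b (diff a b)

-- ===== LEMMAS AND PROOFS =====
theorem sliceFrom2 (x y : Int) (xs : List Int) :
    PySem.List.slice (x :: y :: xs) (some 2) none = xs := by
  have h : (2 : Int) = ((2 : Nat) : Int) := by norm_num
  rw [h, PySem.List.slice_from_natCast]; rfl

-- ===== VERDICT =====
set_option maxHeartbeats 1000000 in
theorem diff_spec : Claim_equal_diff := by
  intro a b _ hpre
  obtain ⟨ha, hb⟩ := hpre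
  obtain ⟨a0, a1, a2, a3, a4, a5, r, hae⟩ :
      ∃ a0 a1 a2 a3 a4 a5 r, a = a0 :: a1 :: a2 :: a3 :: a4 :: a5 :: r := by
    match a, ha with
    | a0 :: a1 :: a2 :: a3 :: a4 :: a5 :: r, _ => exact ⟨a0, a1, a2, a3, a4, a5, r, rfl⟩
  subst hae
  obtain ⟨b0, b1, b2, b3, b4, b5, t, hbe⟩ :
      ∃ b0 b1 b2 b3 b4 b5 t, b = b0 :: b1 :: b2 :: b3 :: b4 :: b5 :: t := by
    match b, hb with
    | b0 :: b1 :: b2 :: b3 :: b4 :: b5 :: t, _ => exact ⟨b0, b1, b2, b3, b4, b5, t, rfl⟩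
  subst hbe
  have h4 : (4 : Int) = ((4 : Nat) : Int) := by norm_num
  unfold Spec_diff diff diff_alt intersectRange
  simp only [diffRec, sliceFrom2, h4, PySem.List.slice_from_natCast, PySem.List.pyGetD_natCast,
    PySem.List.pyGetD_ofNat', List.getD, List.drop, List.getElem?_cons_zero,
    List.getElem?_cons_succ, Option.getD_some, List.map_append]
  norm_num only []
  simp only [if_false, List.append_nil]
  split_ifs <;> rfl
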